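-- pv_equiv track=rewrite | github.com/piedro404/resolucoes-de-problemas | Uri/Strings/Variações.py | variacao
-- ===== SOURCE A (Python) =====
-- def variacao(text):
--     caracEspecial = ["A", "E", "I", "O", "S"]
--     var = 1
--
--     for t in text:
--         if not(t.upper() in caracEspecial):
--             var *= 2
--
--         else:
--             var *= 3
--
--     return var
-- ===== SOURCE B (Python) =====
-- def variacao(text):
--     k = sum(1 for t in text if t.upper() in ("A", "E", "I", "O", "S"))
--     return 2 ** (len(text) - k) * 3 ** k
-- ===== Notes on version B (the rewrite author's own statement) =====
-- stated objective: simpler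
-- what changed: B replaces the running multiplicative accumulator with a single count of special characters and a closed-form 2**(n-k)*3**k.
import Mathlib
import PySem

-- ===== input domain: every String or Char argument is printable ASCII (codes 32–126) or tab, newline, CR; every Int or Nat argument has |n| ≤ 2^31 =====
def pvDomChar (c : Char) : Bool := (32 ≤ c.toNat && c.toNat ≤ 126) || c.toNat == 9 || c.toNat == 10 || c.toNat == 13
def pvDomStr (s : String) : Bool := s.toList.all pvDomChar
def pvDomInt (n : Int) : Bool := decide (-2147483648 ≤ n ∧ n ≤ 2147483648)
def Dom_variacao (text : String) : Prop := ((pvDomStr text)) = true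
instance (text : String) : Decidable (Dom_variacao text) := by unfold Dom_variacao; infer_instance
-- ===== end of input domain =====

-- B replaces A's running multiplicative accumulator by a one-pass count of special characters and the closed form 2^(n-k)*3^k (objective: simpler).

-- ===== PORT A =====
-- t.upper() in ["A","E","I","O","S"] for a single character t
def variacaoSpecial (t : Char) : Bool :=
  [PySem.Chars.upperChar t] ∈ [['A'], ['E'], ['I'], ['O'], ['S']]

def variacao (text : String) : Int :=
  text.toList.foldl (fun var t => if ¬ variacaoSpecial t then var * 2 else var * 3) 1

-- ===== PORT B =====
def variacao_alt (text : String) : Int :=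
  let k := (text.toList.countP (fun t => variacaoSpecial t))
  2 ^ (text.toList.length - k) * 3 ^ k

-- ===== PRECONDITION & SPEC =====
def Spec_variacao (text : String) (out : Int) : Prop := out = variacao_alt text
instance (text : String) (out : Int) : Decidable (Spec_variacao text out) := by unfold Spec_variacao; infer_instance

-- ===== CLAIM (what is proved, stated in full; the proofs are below) =====
def Claim_equal_variacao : Prop := ∀ (text : String), Dom_variacao text → Spec_variacao text (variacao text)

-- ===== LEMMAS AND PROOFS =====
theorem variacao_fold_closed (l : List Char) (var : Int) :
    l.foldl (fun var t => if ¬ variacaoSpecial t then var * 2 else var * 3) var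
      = var * 2 ^ (l.length - l.countP (fun t => variacaoSpecial t)) * 3 ^ (l.countP (fun t => variacaoSpecial t)) := by
  induction l generalizing var with
  | nil => simp
  | cons c cs ih =>
    have hle := List.countP_le_length (p := fun t => variacaoSpecial t) (l := cs)
    by_cases h : variacaoSpecial c
    · rw [List.foldl_cons, if_neg (by simp [h]), ih]
      simp [h, pow_succ]
      ring
    · rw [List.foldl_cons, if_pos (by simp [h]), ih]
      simp [h, pow_succ, Nat.succ_sub hle]
      ring

-- ===== VERDICT (by name: the statement is the Claim_ definition above) =====
theorem variacao_spec : Claim_equal_variacao := by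
  intro text _
  unfold Spec_variacao variacao variacao_alt
  simpa using variacao_fold_closed text.toList 1
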